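-- pv_equiv track=rewrite | github.com/shs395/algorithm | programmers/Lv2/숫자_카드_나누기.py | solution
-- ===== SOURCE A (Python) =====
-- import math
--
-- def solution(arrayA, arrayB):
--     answer = 0
--     arrayA.sort()
--     arrayB.sort()
--     a_gcd = arrayA[0]
--     b_gcd = arrayB[0]
--     a_list = []
--     b_list = []
--
--     for x in arrayA[1:]:
--         a_gcd = math.gcd(x, a_gcd)
--
--     for x in arrayB[1:]:
--         b_gcd = math.gcd(x, b_gcd)
--
--     for i in range(1, a_gcd + 1):
--         if a_gcd % i == 0:
--             a_list.append(i)
--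
--     for i in range(1, b_gcd + 1):
--         if b_gcd % i == 0:
--             b_list.append(i)
--
--     a_list.sort(reverse=True)
--     b_list.sort(reverse=True)
--
--     for x in a_list:
--         flag = True
--         for y in arrayB:
--             if x <= y and y % x == 0:
--                 flag = False
--                 break
--
--         if flag == True:
--             answer = max(answer, x)
--             break
--
--     for x in b_list:
--         flag = True
--         for y in arrayA:
--             if x <= y and y % x == 0:
--                 flag = False
--                 break
--
--         if flag == True:
--             answer = max(answer, x)
--             break
--
--     return answer
-- ===== SOURCE B (Python) =====
-- # B: only the full-array gcds can win: any divisor of g that "survives" implies g itself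
-- # survives (if some y has g<=y and y%g==0, then every positive divisor x of g has x<=y and
-- # y%x==0).  So skip the divisor enumeration and the sorts entirely: one gcd pass per array
-- # plus one scan of the other array.  (A sorts its arguments in place; B does not mutate —
-- # the equivalence is about the return value only.)
-- import math
--
-- def solution(arrayA, arrayB):
--     def fold_gcd(arr):
--         g = arr[0]
--         for v in arr[1:]:
--             g = math.gcd(g, v)
--         return g
--
--     def cand(g, other):
--         if g >= 1 and not any(g <= y and y % g == 0 for y in other):
--             return g
--         return 0
--
--     return max(cand(fold_gcd(arrayA), arrayB), cand(fold_gcd(arrayB), arrayA))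
-- ===== Notes on version B (the rewrite author's own statement) =====
-- stated objective: alternative
-- what changed: B drops A's divisor enumeration up to the gcd value, the four sorts and the descending break-scans: only the whole-array gcds can ever win (if g fails the cross-check so does every divisor of g), so B computes the two gcds in one pass each and checks each against the other array once.
import Mathlib
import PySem

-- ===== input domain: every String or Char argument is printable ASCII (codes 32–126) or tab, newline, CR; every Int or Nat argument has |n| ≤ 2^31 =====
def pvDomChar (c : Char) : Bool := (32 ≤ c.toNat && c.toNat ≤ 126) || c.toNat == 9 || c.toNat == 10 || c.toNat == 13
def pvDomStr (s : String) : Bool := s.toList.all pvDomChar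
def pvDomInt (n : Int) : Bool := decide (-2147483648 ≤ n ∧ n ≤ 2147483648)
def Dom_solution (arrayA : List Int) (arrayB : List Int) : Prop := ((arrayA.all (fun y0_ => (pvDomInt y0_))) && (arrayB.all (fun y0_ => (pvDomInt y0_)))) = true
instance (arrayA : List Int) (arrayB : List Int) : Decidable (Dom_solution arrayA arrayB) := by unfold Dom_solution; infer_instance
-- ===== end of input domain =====

-- B replaces A's divisor enumeration + sorts + descending scans by one gcd pass per array
-- and one scan of the other array.  A sorts both argument lists in place; B does not
-- mutate — the equivalence proved is about the RETURN value only.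


-- ===== PORT A =====
-- math.gcd(a, b): the nonnegative gcd of |a| and |b| — exact (Int.gcd is Nat.gcd of natAbs)
def pyGcd (a b : Int) : Int := (Int.gcd a b : Int)

-- the inner 'for y in arr: if x <= y and y % x == 0: flag = False; break' — returns flag
def innerFlag (x : Int) : List Int → Bool
  | [] => true
  | y :: ys => if x ≤ y ∧ PySem.Int.mod y x = 0 then false else innerFlag x ys

-- 'for x in xs: flag = …; if flag: answer = max(answer, x); break'
def outerLoop (arr : List Int) (answer : Int) : List Int → Int
  | [] => answer
  | x :: rest => if innerFlag x arr then max answer x else outerLoop arr answer rest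

def solution (arrayA : List Int) (arrayB : List Int) : Int :=
  let answer : Int := 0
  let sA := PySem.List.sorted arrayA (fun x => x) false   -- arrayA.sort() (in-place in Python)
  let sB := PySem.List.sorted arrayB (fun x => x) false
  let aGcd0 := (PySem.List.pyGet? sA 0).getD 0            -- arrayA[0]; IndexError on [] → Pre_
  let bGcd0 := (PySem.List.pyGet? sB 0).getD 0
  let aGcd := (PySem.List.slice sA (some 1) none).foldl (fun g x => pyGcd x g) aGcd0
  let bGcd := (PySem.List.slice sB (some 1) none).foldl (fun g x => pyGcd x g) bGcd0
  let aList := (PySem.List.pyRange 1 (aGcd + 1) 1).foldl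
      (fun acc i => if PySem.Int.mod aGcd i = 0 then acc ++ [i] else acc) []
  let bList := (PySem.List.pyRange 1 (bGcd + 1) 1).foldl
      (fun acc i => if PySem.Int.mod bGcd i = 0 then acc ++ [i] else acc) []
  let aDesc := PySem.List.sorted aList (fun x => x) true  -- a_list.sort(reverse=True)
  let bDesc := PySem.List.sorted bList (fun x => x) true
  let answer1 := outerLoop sB answer aDesc
  outerLoop sA answer1 bDesc

-- ===== PORT B =====
-- reduce of math.gcd over the array, seeded with arr[0] ([] is outside Pre_)
def foldGcd : List Int → Int
  | [] => 0
  | x :: xs => xs.foldl (fun g v => (Int.gcd g v : Int)) x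

-- 'g if g >= 1 and not any(g <= y and y % g == 0 for y in other) else 0'
def candB (g : Int) (other : List Int) : Int :=
  if 1 ≤ g ∧ ¬ (other.any (fun y => decide (g ≤ y) && decide (PySem.Int.mod y g = 0))) = true
  then g else 0

def solution_alt (arrayA : List Int) (arrayB : List Int) : Int :=
  max (candB (foldGcd arrayA) arrayB) (candB (foldGcd arrayB) arrayA)

-- ===== PRECONDITION & SPEC =====
-- A evaluates arrayA[0] and arrayB[0]: on an empty array it raises IndexError.
def Pre_solution (arrayA : List Int) (arrayB : List Int) : Prop := arrayA ≠ [] ∧ arrayB ≠ []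
instance (arrayA : List Int) (arrayB : List Int) : Decidable (Pre_solution arrayA arrayB) := by
  unfold Pre_solution; infer_instance
def pvWitness_solution : List Int × List Int := ([12, 30], [5, 7])

def Spec_solution (arrayA : List Int) (arrayB : List Int) (out : Int) : Prop := out = solution_alt arrayA arrayB
instance (arrayA : List Int) (arrayB : List Int) (out : Int) : Decidable (Spec_solution arrayA arrayB out) := by unfold Spec_solution; infer_instance

-- ===== CLAIM (what is proved, stated in full; the proofs are below) =====
def Claim_equal_solution : Prop := ∀ (arrayA : List Int) (arrayB : List Int), Dom_solution arrayA arrayB → Pre_solution arrayA arrayB → Spec_solution arrayA arrayB (solution arrayA arrayB)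

-- ===== LEMMAS AND PROOFS =====

theorem innerFlag_eq_true_iff (x : Int) (l : List Int) :
    innerFlag x l = true ↔ ∀ y ∈ l, ¬ (x ≤ y ∧ PySem.Int.mod y x = 0) := by
  induction l with
  | nil => simp [innerFlag]
  | cons y ys ih =>
    by_cases h : x ≤ y ∧ PySem.Int.mod y x = 0
    · simp only [innerFlag, if_pos h]
      refine iff_of_false (by simp) ?_
      intro hall
      exact hall y (List.mem_cons_self ..) h
    · simp only [innerFlag, if_neg h, ih]
      constructor
      · intro hall z hz
        rcases List.mem_cons.mp hz with rfl | hz'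
        · exact h
        · exact hall z hz'
      · intro hall z hz
        exact hall z (List.mem_cons_of_mem _ hz)

theorem foldl_gcd_cast (l : List Int) (n : Nat) :
    l.foldl (fun g v => (Int.gcd g v : Int)) (n : Int)
      = ((l.foldl (fun m v => Nat.gcd m v.natAbs) n : Nat) : Int) := by
  induction l generalizing n with
  | nil => rfl
  | cons v vs ih =>
    simp only [List.foldl_cons]
    have : Int.gcd (n : Int) v = Nat.gcd n v.natAbs := by simp [Int.gcd]
    rw [this, ih]

theorem foldGcd_eq_natFold (x : Int) (xs : List Int) (hxs : xs ≠ []) :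
    foldGcd (x :: xs) = (((x :: xs).foldl (fun m v => Nat.gcd m v.natAbs) 0 : Nat) : Int) := by
  obtain ⟨v, vs, rfl⟩ := List.exists_cons_of_ne_nil hxs
  simp only [foldGcd, List.foldl_cons]
  have h1 : (Int.gcd x v : Int) = ((Nat.gcd x.natAbs v.natAbs : Nat) : Int) := by simp [Int.gcd]
  have h2 : Nat.gcd (Nat.gcd 0 x.natAbs) v.natAbs = Nat.gcd x.natAbs v.natAbs := by
    simp
  rw [h1, h2, foldl_gcd_cast]

-- gcd fold seeded with the head is the same over any rearrangement of the list
theorem foldGcd_perm {l l' : List Int} (h : l.Perm l') : foldGcd l = foldGcd l' := by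
  cases l with
  | nil => rw [h.symm.eq_nil]
  | cons x xs =>
    cases xs with
    | nil =>
      rw [← List.singleton_perm.mp h]
    | cons v vs =>
      have hlen := h.length_eq
      match l', hlen with
      | y :: w :: ws, _ =>
        rw [foldGcd_eq_natFold x (v :: vs) (by simp),
            foldGcd_eq_natFold y (w :: ws) (by simp)]
        congr 1
        exact h.foldl_eq'
          (fun a _ b _ z => by
            rw [Nat.gcd_assoc, Nat.gcd_assoc, Nat.gcd_comm a.natAbs]) 0

theorem outerLoop_fail (arr : List Int) (ans g : Int) (dl : List Int) (hg : 1 ≤ g)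
    (hex : ∃ y ∈ arr, g ≤ y ∧ PySem.Int.mod y g = 0)
    (hdl : ∀ x ∈ dl, 1 ≤ x ∧ x ∣ g) :
    outerLoop arr ans dl = ans := by
  induction dl with
  | nil => rfl
  | cons x rest ih =>
    obtain ⟨y, hy, hgy, hmod⟩ := hex
    obtain ⟨hx1, hxd⟩ := hdl x (List.mem_cons_self ..)
    have hxg : x ≤ g := Int.le_of_dvd (by omega) hxd
    have hdvd : x ∣ y := dvd_trans hxd ((PySem.Int.mod_eq_zero_iff_dvd y g).mp hmod)
    have hflag : innerFlag x arr = false := by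
      rw [← Bool.not_eq_true, innerFlag_eq_true_iff]
      intro hall
      exact hall y hy ⟨le_trans hxg hgy, (PySem.Int.mod_eq_zero_iff_dvd y x).mpr hdvd⟩
    simp only [outerLoop, hflag, Bool.false_eq_true, if_false]
    exact ih (fun z hz => hdl z (List.mem_cons_of_mem _ hz))

-- one of A's two final loops equals B's candidate, folded into the running answer
theorem stage_eq (g : Int) (arr arrOrig : List Int) (hperm : arr.Perm arrOrig)
    (ans : Int) (h0 : 0 ≤ ans) :
    outerLoop arr ans
      (PySem.List.sorted
        ((PySem.List.pyRange 1 (g + 1) 1).foldl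
          (fun acc i => if PySem.Int.mod g i = 0 then acc ++ [i] else acc) [])
        (fun x => x) true)
      = max ans (candB g arrOrig) := by
  rw [PySem.List.foldl_append_ite_eq_filter]
  simp only [List.nil_append]
  by_cases hg : 1 ≤ g
  · set dl := (PySem.List.pyRange 1 (g + 1) 1).filter
        (fun i => decide (PySem.Int.mod g i = 0)) with hdl
    have hmemdl : ∀ x ∈ dl, 1 ≤ x ∧ x ∣ g := by
      intro x hx
      rw [hdl, List.mem_filter] at hx
      obtain ⟨hr, hd⟩ := hx
      rw [PySem.List.mem_pyRange_one] at hr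
      refine ⟨hr.1, ?_⟩
      exact (PySem.Int.mod_eq_zero_iff_dvd g x).mp (by simpa using hd)
    have hgdl : g ∈ dl := by
      rw [hdl, List.mem_filter, PySem.List.mem_pyRange_one]
      refine ⟨⟨hg, by omega⟩, by simp [(PySem.Int.mod_eq_zero_iff_dvd g g).mpr dvd_rfl]⟩
    have hne : PySem.List.sorted dl (fun x => x) true ≠ [] := by
      rw [Ne, PySem.List.sorted_eq_nil_iff]
      intro hnil; rw [hnil] at hgdl; exact List.not_mem_nil hgdl
    obtain ⟨y, t, hyt⟩ := List.exists_cons_of_ne_nil hne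
    have hymem : y ∈ dl := by
      rw [← PySem.List.mem_sorted dl (fun x => x) true y, hyt]
      exact List.mem_cons_self ..
    have hyg : y = g := by
      have h1 : g ≤ y := PySem.List.key_head_sorted_rev_ge dl (fun x => x) hyt g hgdl
      obtain ⟨hy1, hyd⟩ := hmemdl y hymem
      have : y ≤ g := Int.le_of_dvd (by omega) hyd
      omega
    rw [hyg] at hyt
    by_cases hP : ∃ z ∈ arrOrig, g ≤ z ∧ PySem.Int.mod z g = 0
    · -- g fails its check, hence every divisor of g fails: loop returns ans
      obtain ⟨z, hz, hcond⟩ := hP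
      have hloop : outerLoop arr ans (PySem.List.sorted dl (fun x => x) true) = ans := by
        refine outerLoop_fail arr ans g _ hg ⟨z, hperm.mem_iff.mpr hz, hcond⟩ ?_
        intro x hx
        exact hmemdl x ((PySem.List.mem_sorted dl (fun x => x) true x).mp hx)
      have hcand : candB g arrOrig = 0 := by
        rw [candB, if_neg]
        rintro ⟨-, hany⟩
        exact hany (by simp only [List.any_eq_true]
                       exact ⟨z, hz, by simp [hcond.1, hcond.2]⟩)
      rw [hloop, hcand]
      omega
    · -- g survives: the descending scan takes its head g immediately
      have hflag : innerFlag g arr = true := by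
        rw [innerFlag_eq_true_iff]
        intro z hz hcond
        exact hP ⟨z, hperm.mem_iff.mp hz, hcond⟩
      have hcand : candB g arrOrig = g := by
        rw [candB, if_pos]
        refine ⟨hg, ?_⟩
        simp only [List.any_eq_true]
        rintro ⟨z, hz, hc⟩
        simp only [Bool.and_eq_true, decide_eq_true_eq] at hc
        exact hP ⟨z, hz, hc⟩
      rw [hyt, hcand]
      simp [outerLoop, hflag]
  · -- g ≤ 0: the divisor range is empty, the loop does nothing, and candB is 0
    have hr : PySem.List.pyRange 1 (g + 1) 1 = [] :=
      PySem.List.pyRange_one_eq_nil (by omega)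
    have hc : candB g arrOrig = 0 := by rw [candB, if_neg]; rintro ⟨h1, -⟩; omega
    rw [hr, hc]
    simp only [List.filter_nil]
    have : PySem.List.sorted ([] : List Int) (fun x => x) true = [] := by
      rw [PySem.List.sorted_eq_nil_iff]

    rw [this]
    simp [outerLoop]
    omega

theorem candB_nonneg (g : Int) (arr : List Int) : 0 ≤ candB g arr := by
  rw [candB]; split <;> omega

-- ===== VERDICT (by name: the statement is the Claim_ definition above) =====
theorem solution_spec : Claim_equal_solution := by
  intro arrayA arrayB _hdom hpre
  obtain ⟨hA, hB⟩ := hpre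
  unfold Spec_solution solution solution_alt
  have hsApe : (PySem.List.sorted arrayA (fun x => x) false).Perm arrayA :=
    PySem.List.sorted_perm ..
  have hsBpe : (PySem.List.sorted arrayB (fun x => x) false).Perm arrayB :=
    PySem.List.sorted_perm ..
  have hsAne : PySem.List.sorted arrayA (fun x => x) false ≠ [] := by
    rw [Ne, PySem.List.sorted_eq_nil_iff]; exact hA
  have hsBne : PySem.List.sorted arrayB (fun x => x) false ≠ [] := by
    rw [Ne, PySem.List.sorted_eq_nil_iff]; exact hB
  obtain ⟨a0, at_, hAeq⟩ := List.exists_cons_of_ne_nil hsAne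
  obtain ⟨b0, bt_, hBeq⟩ := List.exists_cons_of_ne_nil hsBne
  -- A's gcd accumulations equal B's foldGcd over the unsorted arrays
  have hfold : ∀ (h : Int) (t : List Int),
      (PySem.List.slice (h :: t) (some 1) none).foldl (fun g x => pyGcd x g)
        ((PySem.List.pyGet? (h :: t) 0).getD 0) = foldGcd (h :: t) := by
    intro h t
    rw [PySem.List.slice_from_one]
    have hget : (PySem.List.pyGet? (h :: t) 0).getD 0 = h := by
      simp [PySem.List.pyGet?, PySem.List.pyIdx?]
    rw [hget]
    show t.foldl (fun g x => pyGcd x g) h = foldGcd (h :: t)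
    simp only [foldGcd]
    exact PySem.List.foldl_congr_mem t _ _ h (fun acc x _ => by
      simp [pyGcd, Int.gcd, Nat.gcd_comm])
  have hgA : (PySem.List.slice (PySem.List.sorted arrayA (fun x => x) false) (some 1) none).foldl
      (fun g x => pyGcd x g)
      ((PySem.List.pyGet? (PySem.List.sorted arrayA (fun x => x) false) 0).getD 0)
      = foldGcd arrayA := by
    rw [hAeq, hfold, ← hAeq]
    exact foldGcd_perm hsApe
  have hgB : (PySem.List.slice (PySem.List.sorted arrayB (fun x => x) false) (some 1) none).foldl
      (fun g x => pyGcd x g)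
      ((PySem.List.pyGet? (PySem.List.sorted arrayB (fun x => x) false) 0).getD 0)
      = foldGcd arrayB := by
    rw [hBeq, hfold, ← hBeq]
    exact foldGcd_perm hsBpe
  simp only [hgA, hgB]
  rw [stage_eq (foldGcd arrayA) (PySem.List.sorted arrayB (fun x => x) false) arrayB hsBpe 0
        le_rfl,
      stage_eq (foldGcd arrayB) (PySem.List.sorted arrayA (fun x => x) false) arrayA hsApe _
        (by have := candB_nonneg (foldGcd arrayA) arrayB; omega)]
  have h1 := candB_nonneg (foldGcd arrayA) arrayB
  omega
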